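-- pv_equiv track=rewrite | github.com/fury93/leetcode_python3_solutions | 3652-find-sorted-submatrices-with-maximum-element-at-most-k/find-sorted-submatrices-with-maximum-element-at-most-k.py | numSubmat
-- ===== SOURCE A (Python) =====
-- from typing import List
--
-- def numSubmat(dp: List[List[int]]) -> int:
--     m, n = len(dp), len(dp[0])
--     res = 0
--     for i in range(m):
--         st = []
--         count = 0
--         for j in range(n):
--             while st and dp[i][st[-1]] >= dp[i][j]:
--                 r = st.pop()
--                 l = st[-1] if st else -1
--                 count -= (dp[i][r] - dp[i][j]) * (r - l)
--
--             st.append(j)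
--             count += dp[i][j]
--             res += count
--
--     return res
-- ===== SOURCE B (Python) =====
-- def numSubmat(dp):
--     n = len(dp[0])
--     res = 0
--     for row in dp:
--         for j in range(n):
--             mn = row[j]
--             res += mn
--             for k in range(j - 1, -1, -1):
--                 mn = min(mn, row[k])
--                 res += mn
--     return res
-- ===== Notes on version B (the rewrite author's own statement) =====
-- stated objective: simpler
-- what changed: Replaces the monotonic-stack incremental maintenance of the sum of subarray minima with a direct per-column backward rescan keeping a running minimum; no stack, no pop arithmetic.
import Mathlib
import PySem

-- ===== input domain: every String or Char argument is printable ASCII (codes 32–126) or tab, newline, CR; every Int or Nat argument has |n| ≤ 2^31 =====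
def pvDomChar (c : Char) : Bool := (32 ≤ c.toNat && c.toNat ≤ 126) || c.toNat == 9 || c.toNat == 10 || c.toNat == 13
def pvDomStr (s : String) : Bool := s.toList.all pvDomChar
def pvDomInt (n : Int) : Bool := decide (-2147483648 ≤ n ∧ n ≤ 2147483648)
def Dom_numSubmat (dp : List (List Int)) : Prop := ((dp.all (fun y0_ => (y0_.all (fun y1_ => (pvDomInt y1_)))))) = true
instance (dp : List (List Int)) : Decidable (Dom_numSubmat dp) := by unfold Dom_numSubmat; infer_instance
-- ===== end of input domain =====

-- B replaces A's monotonic-stack maintenance by a direct per-column backward rescan with a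
-- running minimum (objective: simpler; not faster).

-- ===== PORT A =====
-- shared total list access: Python's row[i]; Pre_ keeps every access in range
def getE (a : List Int) (i : Int) : Int := (PySem.List.pyGet? a i).getD 0

-- the `while st and dp[i][st[-1]] >= dp[i][j]` loop; the Python stack's top (st[-1]) is the HEAD here
def popA (a : List Int) (x : Int) : List Int → Int → List Int × Int
  | [], c => ([], c)
  | r :: rest, c =>
    if x ≤ getE a r then
      popA a x rest (c - (getE a r - x) * (r - rest.head?.getD (-1)))
    else (r :: rest, c)

-- one iteration of A's `for j in range(n)` body on state (st, count, res)
def stepA (a : List Int) (s : List Int × Int × Int) (j : Nat) : List Int × Int × Int :=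
  let x := getE a (j : Int)
  let p := popA a x s.1 s.2.1
  let c := p.2 + x
  ((j : Int) :: p.1, c, s.2.2 + c)

def numSubmat (dp : List (List Int)) : Int :=
  let n := (dp.head?.getD []).length
  (List.range dp.length).foldl
    (fun res i => ((List.range n).foldl (stepA (dp.getD i [])) ([], 0, res)).2.2)
    0

-- ===== PORT B =====
-- the `for k in range(j-1,-1,-1)` loop: argument counts the remaining indices k+1 … 0? no: first arg t means next index t-1
def backB (a : List Int) : Nat → Int → Int → Int
  | 0, _, res => res
  | k+1, mn, res =>
    let m2 := min mn (getE a (k : Int))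
    backB a k m2 (res + m2)

-- the `for j in range(n)` loop of B
def rowB (a : List Int) (n : Nat) (res : Int) : Int :=
  (List.range n).foldl (fun r j => backB a j (getE a (j : Int)) (r + getE a (j : Int))) res

def numSubmat_alt (dp : List (List Int)) : Int :=
  let n := (dp.head?.getD []).length
  dp.foldl (fun res row => rowB row n res) 0

-- ===== PRECONDITION & SPEC =====
-- Pre_ excludes exactly the inputs where the Python raises IndexError: the empty matrix
-- (dp[0]) and ragged matrices with some row shorter than row 0 while n > 0.
def Pre_numSubmat (dp : List (List Int)) : Prop :=
  dp ≠ [] ∧ ∀ row ∈ dp, (dp.head?.getD []).length ≤ row.length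
instance (dp : List (List Int)) : Decidable (Pre_numSubmat dp) := by unfold Pre_numSubmat; infer_instance

def pvWitness_numSubmat : List (List Int) := [[1, 2], [3, 0]]

def Spec_numSubmat (dp : List (List Int)) (out : Int) : Prop := out = numSubmat_alt dp
instance (dp : List (List Int)) (out : Int) : Decidable (Spec_numSubmat dp out) := by unfold Spec_numSubmat; infer_instance

-- ===== CLAIM (what is proved, stated in full; the proofs are below) =====
def Claim_equal_numSubmat : Prop := ∀ (dp : List (List Int)), Dom_numSubmat dp → Pre_numSubmat dp → Spec_numSubmat dp (numSubmat dp)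

-- ===== LEMMAS AND PROOFS =====

-- Mg a k g = minimum of a[k..k+g] (via getE)
def Mg (a : List Int) : Nat → Nat → Int
  | k, 0 => getE a (k : Int)
  | k, g+1 => min (getE a (k : Int)) (Mg a (k+1) g)

-- Ssum a j t = Σ_{k<t} min a[k..j]
def Ssum (a : List Int) (j t : Nat) : Int :=
  ((List.range t).map (fun k => Mg a k (j - k))).sum

-- RTot a n = Σ_{j<n} Σ_{k≤j} min a[k..j]   (one row's contribution)
def RTot (a : List Int) (n : Nat) : Int :=
  ((List.range n).map (fun j => Ssum a j (j + 1))).sum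

-- A's `count` as a function of the stack
def stVal (a : List Int) : List Int → Int
  | [] => 0
  | r :: rest => getE a r * (r - rest.head?.getD (-1)) + stVal a rest

-- stack invariant after processing index jp: blocks (l,r] of constant segment-minimum
def SB (a : List Int) (jp : Nat) : List Int → Prop
  | [] => True
  | r :: rest =>
    rest.head?.getD (-1) < r ∧ 0 ≤ r ∧ r ≤ (jp : Int) ∧
    (∀ k : Nat, rest.head?.getD (-1) < (k : Int) → (k : Int) ≤ r → Mg a k (jp - k) = getE a r) ∧
    SB a jp rest

def AInv (a : List Int) (j : Nat) (s : List Int) (c : Int) : Prop :=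
  (j = 0 ∧ s = [] ∧ c = 0) ∨
  (∃ jp : Nat, j = jp + 1 ∧ s.head? = some ((jp : Nat) : Int) ∧ SB a jp s ∧ c = stVal a s)

theorem Mg_snoc (a : List Int) : ∀ (g k : Nat),
    Mg a k (g+1) = min (Mg a k g) (getE a ((k+g+1 : Nat) : Int)) := by
  intro g
  induction g with
  | zero => intro k; simp [Mg]
  | succ g ih =>
    intro k
    show min (getE a (k : Int)) (Mg a (k+1) (g+1)) = _
    rw [ih (k+1)]
    rw [← min_assoc]
    have : Mg a k (g+1) = min (getE a (k : Int)) (Mg a (k+1) g) := rfl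
    rw [← this]
    norm_num [Nat.add_assoc, Nat.add_comm, Nat.add_left_comm]

theorem Mg_le (a : List Int) : ∀ (g k t : Nat), t ≤ g →
    Mg a k g ≤ getE a ((k+t : Nat) : Int) := by
  intro g
  induction g with
  | zero => intro k t ht; interval_cases t; simp [Mg]
  | succ g ih =>
    intro k t ht
    cases t with
    | zero => exact le_trans (min_le_left _ _) (by simp)
    | succ t =>
      have h1 : Mg a k (g+1) ≤ Mg a (k+1) g := min_le_right _ _
      have h2 := ih (k+1) t (by omega)
      have : (k+1+t : Nat) = (k + (t+1) : Nat) := by omega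
      rw [this] at h2
      exact le_trans h1 h2

theorem Ssum_succ (a : List Int) (j t : Nat) :
    Ssum a j (t+1) = Ssum a j t + Mg a t (j - t) := by
  simp [Ssum, List.range_succ]

theorem Ssum_const (a : List Int) (j : Nat) (v : Int) :
    ∀ (t2 t1 : Nat), t1 ≤ t2 → (∀ k : Nat, t1 ≤ k → k < t2 → Mg a k (j - k) = v) →
    Ssum a j t2 = Ssum a j t1 + v * ((t2 : Int) - (t1 : Int)) := by
  intro t2
  induction t2 with
  | zero => intro t1 h1 _; interval_cases t1; simp
  | succ t2 ih =>
    intro t1 h1 hk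
    by_cases he : t1 = t2 + 1
    · subst he; simp
    · have h2 : t1 ≤ t2 := by omega
      rw [Ssum_succ, ih t1 h2 (fun k a b => hk k a (by omega)), hk t2 h2 (by omega)]
      push_cast
      ring

theorem SB_head_ge (a : List Int) (jp : Nat) (s : List Int) (h : SB a jp s) :
    -1 ≤ s.head?.getD (-1) := by
  cases s with
  | nil => simp
  | cons r rest => simp only [SB] at h; simp only [List.head?_cons, Option.getD_some]; omega

theorem SB_sum (a : List Int) (j : Nat) : ∀ (s : List Int), SB a j s →
    stVal a s = Ssum a j ((s.head?.getD (-1) + 1).toNat) := by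
  intro s
  induction s with
  | nil => intro _; simp [stVal, Ssum]
  | cons r rest ih =>
    intro h
    obtain ⟨hlr, hr0, hrj, hblk, hrest⟩ := h
    have hl1 : -1 ≤ rest.head?.getD (-1) := SB_head_ge a j rest hrest
    set l : Int := rest.head?.getD (-1) with hl
    have hcast : ((((r+1).toNat : Nat)) : Int) = r + 1 := by omega
    have hcast2 : ((((l+1).toNat : Nat)) : Int) = l + 1 := by omega
    have hconst := Ssum_const a j (getE a r) (r+1).toNat (l+1).toNat (by omega)
      (by intro k hk1 hk2
          apply hblk k
          · omega
          · omega)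
    show getE a r * (r - l) + stVal a rest = Ssum a j ((r+1).toNat)
    rw [ih hrest, hconst, hcast, hcast2]
    ring

theorem popA_spec (a : List Int) (x : Int) (jp : Nat) :
    ∀ (s : List Int) (c : Int), SB a jp s →
    (∀ k : Nat, s.head?.getD (-1) < (k : Int) → (k : Int) ≤ (jp : Int) → x ≤ Mg a k (jp - k)) →
    c = stVal a s + x * ((jp : Int) - s.head?.getD (-1)) →
    ∃ s2 : List Int,
      popA a x s c = (s2, stVal a s2 + x * ((jp : Int) - s2.head?.getD (-1))) ∧
      SB a jp s2 ∧
      (∀ r ∈ s2.head?, getE a r < x) ∧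
      (∀ k : Nat, s2.head?.getD (-1) < (k : Int) → (k : Int) ≤ (jp : Int) → x ≤ Mg a k (jp - k)) := by
  intro s
  induction s with
  | nil =>
    intro c hsb hreg hc
    refine ⟨[], ?_, trivial, by simp, hreg⟩
    simp [popA, hc]
  | cons r rest ih =>
    intro c hsb hreg hc
    obtain ⟨hlr, hr0, hrj, hblk, hrest⟩ := hsb
    by_cases hpop : x ≤ getE a r
    · -- pop r
      have hrec := ih (c - (getE a r - x) * (r - rest.head?.getD (-1))) hrest
        (by intro k hk1 hk2
            by_cases hkr : (k : Int) ≤ r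
            · rw [hblk k hk1 hkr]; exact hpop
            · exact hreg k (by simp; omega) hk2)
        (by simp only [stVal, List.head?_cons, Option.getD_some] at hc ⊢
            rw [hc]; ring)
      obtain ⟨s2, heq, h2, h3, h4⟩ := hrec
      refine ⟨s2, ?_, h2, h3, h4⟩
      simp only [popA, if_pos hpop]
      exact heq
    · -- stop
      rw [not_le] at hpop
      refine ⟨r :: rest, ?_, ⟨hlr, hr0, hrj, hblk, hrest⟩, by simpa using hpop, ?_⟩
      · simp only [popA, if_neg (by omega : ¬ x ≤ getE a r)]
        simp only [hc]
      · intro k hk1 hk2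
        simp only [List.head?_cons, Option.getD_some] at hk1
        exact hreg k (by simpa using hk1) hk2

theorem SB_lift (a : List Int) (jp : Nat) (x : Int) (hx : x = getE a ((jp+1 : Nat) : Int)) :
    ∀ (s : List Int), SB a jp s → (∀ r ∈ s.head?, getE a r < x) → SB a (jp+1) s := by
  intro s
  induction s with
  | nil => intro _ _; trivial
  | cons r rest ih =>
    intro h hhd
    obtain ⟨hlr, hr0, hrj, hblk, hrest⟩ := h
    have hrx : getE a r < x := hhd r rfl
    refine ⟨hlr, hr0, by omega, ?_, ?_⟩
    · intro k hk1 hk2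
      have hkr : (k : Nat) ≤ jp := by omega
      have hg : (jp + 1 - k : Nat) = (jp - k) + 1 := by omega
      rw [hg, Mg_snoc]
      have hidx : ((k + (jp - k) + 1 : Nat) : Int) = ((jp + 1 : Nat) : Int) := by
        push_cast; omega
      rw [hidx, ← hx, hblk k hk1 hk2]
      exact min_eq_left (le_of_lt hrx)
    · apply ih hrest
      intro r' hr'
      cases rest with
      | nil => simp at hr'
      | cons r2 rest2 =>
        simp only [List.head?_cons, Option.mem_def, Option.some.injEq] at hr'
        subst hr'
        obtain ⟨hlr2, hr02, hrj2, hblk2, _⟩ := hrest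
        simp only [List.head?_cons, Option.getD_some] at hlr
        -- getE a r2 = Mg a r2.toNat (jp - r2.toNat) ≤ getE a r < x
        have hb := hblk2 r2.toNat (by omega) (by omega)
        have hle := Mg_le a (jp - r2.toNat) r2.toNat (r.toNat - r2.toNat) (by omega)
        have hidx : ((r2.toNat + (r.toNat - r2.toNat) : Nat) : Int) = r := by omega
        rw [hidx] at hle
        rw [hb] at hle
        exact lt_of_le_of_lt hle hrx

theorem stepA_inv (a : List Int) (j : Nat) (s : List Int) (c res : Int)
    (h : AInv a j s c) :
    ∃ s' c', stepA a (s, c, res) j = (s', c', res + c') ∧ AInv a (j+1) s' c' ∧ c' = Ssum a j (j+1) := by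
  rcases h with ⟨hj, hs, hc⟩ | ⟨jp, hj, hhd, hsb, hc⟩
  · -- j = 0, s = [], c = 0
    subst hj; subst hs; subst hc
    refine ⟨[(0:Int)], getE a 0, ?_, ?_, ?_⟩
    · simp [stepA, popA]
    · refine Or.inr ⟨0, rfl, by simp, ?_, ?_⟩
      · refine ⟨by simp, by simp, by simp, ?_, trivial⟩
        intro k hk1 hk2
        have : k = 0 := by simp at hk1 hk2; omega
        subst this
        simp [Mg]
      · simp [stVal]
    · simp [Ssum, Mg, List.range_succ]
  · -- j = jp + 1
    subst hj
    have hhead : s.head?.getD (-1) = ((jp : Nat) : Int) := by rw [hhd]; rfl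
    set x := getE a ((jp + 1 : Nat) : Int) with hx
    have hpop := popA_spec a x jp s c hsb
      (by intro k hk1 hk2; rw [hhead] at hk1; omega)
      (by rw [hhead, hc]; ring)
    obtain ⟨s2, heq, hsb2, hlt2, hreg2⟩ := hpop
    set l2 : Int := s2.head?.getD (-1) with hl2
    have hl2ge : -1 ≤ l2 := SB_head_ge a jp s2 hsb2
    have hl2le : l2 ≤ (jp : Int) := by
      cases s2 with
      | nil => simp [hl2]
      | cons r2 rest2 => obtain ⟨_, _, hrj2, _, _⟩ := hsb2; simp only [hl2, List.head?_cons, Option.getD_some]; exact hrj2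
    have hblknew : ∀ k : Nat, l2 < (k : Int) → (k : Int) ≤ (((jp+1 : Nat) : Nat) : Int) →
        Mg a k (jp + 1 - k) = x := by
      intro k hk1 hk2
      by_cases hkj : k = jp + 1
      · subst hkj; simp only [Nat.sub_self]; simp [Mg, hx]
      · have hkle : (k : Nat) ≤ jp := by push_cast at hk2; omega
        have hg : (jp + 1 - k : Nat) = (jp - k) + 1 := by omega
        rw [hg, Mg_snoc]
        have hidx : ((k + (jp - k) + 1 : Nat) : Int) = ((jp + 1 : Nat) : Int) := by push_cast; omega
        rw [hidx, ← hx]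
        have := hreg2 k hk1 (by omega)
        exact min_eq_right this
    have hsbnew : SB a (jp+1) (((jp+1 : Nat) : Int) :: s2) := by
      refine ⟨by omega, by positivity, by omega, ?_, ?_⟩
      · intro k hk1 hk2
        simpa using hblknew k (by simpa [hl2] using hk1) (by omega)
      · exact SB_lift a jp x hx s2 hsb2 hlt2
    refine ⟨((jp+1 : Nat) : Int) :: s2, x * (((jp:Int)+1) - l2) + stVal a s2, ?_, ?_, ?_⟩
    · simp only [stepA]
      rw [← hx, heq]
      simp only [Prod.mk.injEq]
      refine ⟨trivial, by ring_nf, by ring_nf⟩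
    · refine Or.inr ⟨jp+1, rfl, by simp, hsbnew, ?_⟩
      simp only [stVal, ← hl2]
      rw [← hx]
      push_cast
      ring
    · have h := SB_sum a (jp+1) _ hsbnew
      simp only [stVal, List.head?_cons, Option.getD_some] at h
      rw [← hl2] at h
      have hn : (((((jp+1 : Nat):Int) + 1).toNat : Nat)) = jp + 1 + 1 := by omega
      rw [hn] at h
      rw [← h, ← hx]
      push_cast
      ring

theorem rowA_spec (a : List Int) : ∀ (n : Nat) (res : Int),
    ∃ s c, (List.range n).foldl (stepA a) ([], 0, res) = (s, c, res + RTot a n) ∧ AInv a n s c := by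
  intro n
  induction n with
  | zero =>
    intro res
    exact ⟨[], 0, by simp [RTot], Or.inl ⟨rfl, rfl, rfl⟩⟩
  | succ n ih =>
    intro res
    obtain ⟨s, c, heq, hainv⟩ := ih res
    obtain ⟨s', c', heq', hainv', hc'⟩ := stepA_inv a n s c (res + RTot a n) hainv
    refine ⟨s', c', ?_, hainv'⟩
    rw [List.range_succ, List.foldl_append, heq]
    simp only [List.foldl_cons, List.foldl_nil, heq']
    have : RTot a (n+1) = RTot a n + Ssum a n (n+1) := by simp [RTot, List.range_succ]
    rw [this, hc']
    ring_nf

theorem backB_spec (a : List Int) (j : Nat) : ∀ (t : Nat), t ≤ j → ∀ (res : Int),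
    backB a t (Mg a t (j - t)) res = res + Ssum a j t := by
  intro t
  induction t with
  | zero => intro _ res; simp [backB, Ssum]
  | succ t ih =>
    intro ht res
    have hg : (j - t : Nat) = (j - (t+1)) + 1 := by omega
    have hmin : min (Mg a (t+1) (j - (t+1))) (getE a (t : Int)) = Mg a t (j - t) := by
      rw [hg]
      show _ = min (getE a (t : Int)) (Mg a (t+1) (j - (t+1)))
      rw [min_comm]
    show backB a t (min (Mg a (t+1) (j - (t+1))) (getE a (t:Int)))
        (res + min (Mg a (t+1) (j - (t+1))) (getE a (t:Int))) = res + Ssum a j (t+1)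
    rw [hmin, ih (by omega), Ssum_succ]
    ring

theorem rowB_spec (a : List Int) : ∀ (n : Nat) (res : Int), rowB a n res = res + RTot a n := by
  intro n
  induction n with
  | zero => intro res; simp [rowB, RTot]
  | succ n ih =>
    intro res
    simp only [rowB, List.range_succ, List.foldl_append, List.foldl_cons, List.foldl_nil]
    rw [show (List.range n).foldl (fun r j => backB a j (getE a (j : Int)) (r + getE a (j : Int))) res = rowB a n res from rfl, ih]
    have h0 : getE a (n : Int) = Mg a n (n - n) := by simp [Mg]
    rw [h0, backB_spec a n n le_rfl]
    have : Ssum a n (n+1) = Ssum a n n + Mg a n (n - n) := Ssum_succ a n n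
    simp only [RTot, List.range_succ, List.map_append, List.sum_append, List.map_cons,
      List.map_nil, List.sum_cons, List.sum_nil]
    rw [this]
    ring

theorem row_eq (a : List Int) (n : Nat) (res : Int) :
    ((List.range n).foldl (stepA a) ([], 0, res)).2.2 = rowB a n res := by
  obtain ⟨s, c, heq, _⟩ := rowA_spec a n res
  rw [heq, rowB_spec]

theorem outer_eq (n : Nat) : ∀ (dp : List (List Int)) (res : Int),
    (List.range dp.length).foldl
      (fun res i => ((List.range n).foldl (stepA (dp.getD i [])) ([], 0, res)).2.2) res
    = dp.foldl (fun res row => rowB row n res) res := by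
  intro dp
  induction dp with
  | nil => intro res; simp
  | cons a t ih =>
    intro res
    rw [List.length_cons, List.range_succ_eq_map, List.foldl_cons, List.foldl_map]
    simp only [List.getD_cons_zero, List.getD_cons_succ]
    rw [ih, List.foldl_cons, row_eq]

-- ===== VERDICT (by name: the statement is the Claim_ definition above) =====
theorem numSubmat_spec : Claim_equal_numSubmat := by
  intro dp _ _
  show numSubmat dp = numSubmat_alt dp
  unfold numSubmat numSubmat_alt
  exact outer_eq (dp.head?.getD []).length dp 0
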